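-- pv_equiv track=rewrite | github.com/aleksandra-tucholska/paldus | fortran_code.py | execute_delta_in_delta
-- ===== SOURCE A (Python) =====
-- def execute_delta_in_delta(delta_old):
--
--     """ Executes the delta function in given
--     delta string.
--     """
--
--     delta = []
--     for i in range(0, len(delta_old)):
--         delta_old[i].sort()
--         delta.append(delta_old[i])
--     delta.sort()
--
--     new_delta = []
--     for i in range(0, len(delta)):
--         for j in range(0, len(delta)):
--             if j != i:
--                 for k in range(0, 2):
--                     if delta[j][k] == delta[i][1]:
--                         delta[j][k] = delta[i][0]
--                 delta[j].sort()
--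
--
--     for i in range(0, len(delta)):
--         if delta[i][0] != delta[i][1]:
--             new_delta.append(delta[i])
--
--
--     new_delta.sort()
--
--     return new_delta
-- ===== SOURCE B (Python) =====
-- def execute_delta_in_delta(delta_old):
--     """Union-find re-implementation (same return value; unlike A it does not
--     mutate delta_old's rows in place).
--
--     Rows (lexicographically sorted, each row sorted) are edges between their
--     two smallest entries; cells beyond the first two are inert.  Processing
--     rows in order with union-by-minimum, a row survives iff its endpoints'
--     roots differ at its turn; it then ends up as [component minimum, larger
--     root at union time] + its tail.
--     """
--     rows = sorted(sorted(r) for r in delta_old)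
--     parent = {}
--
--     def find(x):
--         while x in parent:
--             x = parent[x]
--         return x
--
--     pend = []
--     for r in rows:
--         ru = find(r[0])
--         rv = find(r[1])
--         if ru != rv:
--             lo, hi = (ru, rv) if ru < rv else (rv, ru)
--             parent[hi] = lo
--             pend.append((hi, r[2:]))
--     return sorted([find(hi), hi] + tail for hi, tail in pend)
-- ===== Notes on version B (the rewrite author's own statement) =====
-- stated objective: faster
-- what changed: Replaces the quadratic relabelling pass (for every row, substitute its second entry by its first in every other row and re-sort) by a single union-find sweep over the sorted rows that records, per surviving row, the larger root at union time and its inert tail, then emits [component minimum, recorded root] + tail and sorts.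
import Mathlib
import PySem

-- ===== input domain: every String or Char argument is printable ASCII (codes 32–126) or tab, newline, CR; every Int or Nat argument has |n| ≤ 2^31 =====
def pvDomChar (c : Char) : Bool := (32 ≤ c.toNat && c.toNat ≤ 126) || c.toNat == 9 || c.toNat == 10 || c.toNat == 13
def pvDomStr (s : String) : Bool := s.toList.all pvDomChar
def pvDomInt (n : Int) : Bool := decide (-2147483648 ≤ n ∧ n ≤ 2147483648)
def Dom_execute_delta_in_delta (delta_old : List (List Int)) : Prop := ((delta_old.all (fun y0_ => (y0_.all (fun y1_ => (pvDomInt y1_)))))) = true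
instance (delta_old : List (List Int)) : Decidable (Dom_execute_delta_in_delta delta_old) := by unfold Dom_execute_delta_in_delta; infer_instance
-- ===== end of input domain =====

-- B is a union-find re-implementation of A's quadratic relabelling pass (asymptotically
-- faster); equivalence is about the RETURN value only: A sorts delta_old's rows in place, B does not mutate.

-- ===== PORT A =====
-- shared tiny wrapper for Python's list.sort()/sorted on a row of ints
def pvSortRow (r : List Int) : List Int := PySem.List.sorted r (fun x => x) false

-- body of A's inner 'for j in range(0, len(delta))' loop (i, j are the Python ints)
def pvAInner (i : Int) (d : List (List Int)) (j : Int) : List (List Int) :=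
  if j ≠ i then
    let d2 := (PySem.List.pyRange 0 2 1).foldl (fun d k =>
        if PySem.List.pyGetD (PySem.List.pyGetD d j []) k 0
             = PySem.List.pyGetD (PySem.List.pyGetD d i []) 1 0 then
          PySem.List.pySetD d j
            (PySem.List.pySetD (PySem.List.pyGetD d j []) k
              (PySem.List.pyGetD (PySem.List.pyGetD d i []) 0 0))
        else d) d
    PySem.List.pySetD d2 j (pvSortRow (PySem.List.pyGetD d2 j []))
  else d

def execute_delta_in_delta (delta_old : List (List Int)) : List (List Int) :=
  let delta := (PySem.List.pyRange 0 (PySem.List.len delta_old) 1).foldl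
      (fun acc i => acc ++ [pvSortRow (PySem.List.pyGetD delta_old i [])]) []
  let delta := PySem.List.sorted delta (fun x => x) false
  let delta := (PySem.List.pyRange 0 (PySem.List.len delta) 1).foldl
      (fun d i => (PySem.List.pyRange 0 (PySem.List.len d) 1).foldl (pvAInner i) d) delta
  let new_delta := (PySem.List.pyRange 0 (PySem.List.len delta) 1).foldl (fun acc i =>
      if PySem.List.pyGetD (PySem.List.pyGetD delta i []) 0 0
           ≠ PySem.List.pyGetD (PySem.List.pyGetD delta i []) 1 0 then
        acc ++ [PySem.List.pyGetD delta i []]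
      else acc) []
  PySem.List.sorted new_delta (fun x => x) false

-- ===== PORT B =====
-- Source B's 'find': while x in parent: x = parent[x].  Fuel = number of entries is exact:
-- parent maps every key to a strictly smaller value and keys are distinct, so a
-- lookup chain can visit each key at most once.
def pvFindGo (p : PySem.Dict Int Int) : Nat → Int → Int
  | 0, x => x
  | n + 1, x =>
    match p.get? x with
    | some y => pvFindGo p n y
    | none => x

def pvFind (p : PySem.Dict Int Int) (x : Int) : Int := pvFindGo p (PySem.Dict.size p) x

-- body of Source B's 'for r in rows' loop; state = (parent, pend)
def pvBStep (st : PySem.Dict Int Int × List (Int × List Int)) (r : List Int) :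
    PySem.Dict Int Int × List (Int × List Int) :=
  let ru := pvFind st.1 (PySem.List.pyGetD r 0 0)
  let rv := pvFind st.1 (PySem.List.pyGetD r 1 0)
  if ru ≠ rv then
    let lo := if ru < rv then ru else rv
    let hi := if ru < rv then rv else ru
    (st.1.insert hi lo, st.2 ++ [(hi, PySem.List.slice r (some 2) none)])
  else st

def execute_delta_in_delta_alt (delta_old : List (List Int)) : List (List Int) :=
  let rows := PySem.List.sorted (delta_old.map pvSortRow) (fun x => x) false
  let st := rows.foldl pvBStep (PySem.Dict.empty, [])
  PySem.List.sorted (st.2.map (fun p => pvFind st.1 p.1 :: p.1 :: p.2)) (fun x => x) false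

-- ===== PRECONDITION & SPEC =====
-- Pre_ excludes exactly the inputs with a row of fewer than two entries, on which the
-- Python A raises IndexError (delta[i][1] / delta[j][k]).
def Pre_execute_delta_in_delta (delta_old : List (List Int)) : Prop :=
  ∀ r ∈ delta_old, 2 ≤ r.length
instance (delta_old : List (List Int)) : Decidable (Pre_execute_delta_in_delta delta_old) := by
  unfold Pre_execute_delta_in_delta; infer_instance

def pvWitness_execute_delta_in_delta : List (List Int) := [[2, 1], [3, 2], [5, 4]]

def Spec_execute_delta_in_delta (delta_old : List (List Int)) (out : List (List Int)) : Prop :=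
  out = execute_delta_in_delta_alt delta_old
instance (delta_old : List (List Int)) (out : List (List Int)) :
    Decidable (Spec_execute_delta_in_delta delta_old out) := by
  unfold Spec_execute_delta_in_delta; infer_instance

-- ===== CLAIM (what is proved, stated in full; the proofs are below) =====
def Claim_equal_execute_delta_in_delta : Prop :=
  ∀ (delta_old : List (List Int)), Dom_execute_delta_in_delta delta_old →
    Pre_execute_delta_in_delta delta_old →
    Spec_execute_delta_in_delta delta_old (execute_delta_in_delta delta_old)

-- ===== LEMMAS AND PROOFS =====

-- ---- union-find facts (parent maps: distinct keys, strictly decreasing entries) ----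

def pvWF (p : PySem.Dict Int Int) : Prop :=
  (PySem.Dict.keys p).Nodup ∧ ∀ k v, p.get? k = some v → v < k

/-- number of keys ≤ x, the termination measure of `find`. -/
def pvKB (p : PySem.Dict Int Int) (x : Int) : Nat :=
  ((PySem.Dict.keys p).filter (fun k => decide (k ≤ x))).length

theorem pvFindGo_stop (p : PySem.Dict Int Int) (f : Nat) (x : Int)
    (h : p.get? x = none) : pvFindGo p f x = x := by
  cases f <;> simp [pvFindGo, h]

theorem pv_mem_keys_of_get? (p : PySem.Dict Int Int) (x y : Int)
    (h : p.get? x = some y) : x ∈ PySem.Dict.keys p := by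
  by_contra hn
  rw [← PySem.Dict.get?_eq_none_iff_not_mem_keys] at hn
  rw [hn] at h; cases h

theorem pvKB_lt (p : PySem.Dict Int Int) (x y : Int) (hw : pvWF p)
    (h : p.get? x = some y) : pvKB p y < pvKB p x := by
  have hx : x ∈ PySem.Dict.keys p := pv_mem_keys_of_get? p x y h
  have hyx : y < x := hw.2 x y h
  unfold pvKB
  have h1 : (PySem.Dict.keys p).filter (fun k => decide (k ≤ y))
      = ((PySem.Dict.keys p).filter (fun k => decide (k ≤ x))).filter (fun k => decide (k ≤ y)) := by
    rw [List.filter_filter]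
    apply List.filter_congr
    intro k _
    by_cases hky : k ≤ y
    · have : k ≤ x := by omega
      simp [hky, this]
    · simp [hky]
  rw [h1]
  apply List.length_filter_lt_length_iff_exists.mpr
  refine ⟨x, List.mem_filter.mpr ⟨hx, by simp⟩, by simp; omega⟩

theorem pvKB_le_size (p : PySem.Dict Int Int) (x : Int) : pvKB p x ≤ PySem.Dict.size p := by
  have h := List.length_filter_le (fun k => decide (k ≤ x)) (PySem.Dict.keys p)
  have h2 : (PySem.Dict.keys p).length = PySem.Dict.size p := by
    simp [PySem.Dict.keys, PySem.Dict.size]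
  unfold pvKB
  omega

theorem pv_get?_none_of_pvKB_zero (p : PySem.Dict Int Int) (x : Int)
    (h : pvKB p x = 0) : p.get? x = none := by
  cases hg : p.get? x with
  | none => rfl
  | some y =>
    have hx : x ∈ PySem.Dict.keys p := pv_mem_keys_of_get? p x y hg
    have : x ∈ (PySem.Dict.keys p).filter (fun k => decide (k ≤ x)) :=
      List.mem_filter.mpr ⟨hx, by simp⟩
    unfold pvKB at h
    rw [List.length_eq_zero_iff] at h
    rw [h] at this
    cases this

theorem pvFindGo_root (p : PySem.Dict Int Int) (hw : pvWF p) :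
    ∀ (f : Nat) (x : Int), pvKB p x ≤ f → p.get? (pvFindGo p f x) = none := by
  intro f
  induction f with
  | zero =>
    intro x hx
    have := pv_get?_none_of_pvKB_zero p x (Nat.le_zero.mp hx)
    simpa [pvFindGo] using this
  | succ n ih =>
    intro x hx
    cases hg : p.get? x with
    | none => simpa [pvFindGo, hg] using hg
    | some y =>
      have hlt := pvKB_lt p x y hw hg
      simpa [pvFindGo, hg] using ih y (by omega)

theorem pvFindGo_fuel (p : PySem.Dict Int Int) (hw : pvWF p) :
    ∀ (f m : Nat) (x : Int), pvKB p x ≤ f → pvFindGo p (f + m) x = pvFindGo p f x := by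
  intro f
  induction f with
  | zero =>
    intro m x hx
    have hg := pv_get?_none_of_pvKB_zero p x (Nat.le_zero.mp hx)
    rw [pvFindGo_stop p _ x hg, pvFindGo_stop p _ x hg]
  | succ n ih =>
    intro m x hx
    cases hg : p.get? x with
    | none => rw [pvFindGo_stop p _ x hg, pvFindGo_stop p _ x hg]
    | some y =>
      have hlt := pvKB_lt p x y hw hg
      have : n + 1 + m = (n + m) + 1 := by omega
      rw [this]
      show pvFindGo p ((n + m) + 1) x = pvFindGo p (n + 1) x
      simp only [pvFindGo, hg]
      exact ih m y (by omega)

theorem pvFind_root (p : PySem.Dict Int Int) (hw : pvWF p) (x : Int) :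
    p.get? (pvFind p x) = none := by
  exact pvFindGo_root p hw _ x (pvKB_le_size p x)

theorem pvFind_stop (p : PySem.Dict Int Int) (x : Int) (h : p.get? x = none) :
    pvFind p x = x := pvFindGo_stop p _ x h

theorem pvFind_step (p : PySem.Dict Int Int) (hw : pvWF p) (x y : Int)
    (h : p.get? x = some y) : pvFind p x = pvFind p y := by
  have hlt := pvKB_lt p x y hw h
  have hle := pvKB_le_size p x
  have hs : 1 ≤ PySem.Dict.size p := by omega
  unfold pvFind
  have h1 : PySem.Dict.size p = (PySem.Dict.size p - 1) + 1 := by omega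
  rw [h1]
  show pvFindGo p ((PySem.Dict.size p - 1) + 1) x = pvFindGo p ((PySem.Dict.size p - 1) + 1) y
  conv_lhs => simp only [pvFindGo, h]
  exact (pvFindGo_fuel p hw (PySem.Dict.size p - 1) 1 y (by omega)).symm

theorem pvFindGo_le (p : PySem.Dict Int Int) (hw : pvWF p) :
    ∀ (f : Nat) (x : Int), pvFindGo p f x ≤ x := by
  intro f
  induction f with
  | zero => intro x; simp [pvFindGo]
  | succ n ih =>
    intro x
    cases hg : p.get? x with
    | none => simp [pvFindGo, hg]
    | some y =>
      have := hw.2 x y hg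
      have := ih y
      simp only [pvFindGo, hg]
      omega

theorem pvFind_le (p : PySem.Dict Int Int) (hw : pvWF p) (x : Int) : pvFind p x ≤ x :=
  pvFindGo_le p hw _ x

theorem pvFind_lt_key (p : PySem.Dict Int Int) (hw : pvWF p) (x y : Int)
    (h : p.get? x = some y) : pvFind p x < x := by
  have := pvFind_step p hw x y h
  have := pvFind_le p hw y
  have := hw.2 x y h
  omega

theorem pvWF_insert (p : PySem.Dict Int Int) (hw : pvWF p) (a b : Int)
    (hb : p.get? b = none) (hab : a < b) : pvWF (p.insert b a) := by
  have hbk : b ∉ PySem.Dict.keys p := (PySem.Dict.get?_eq_none_iff_not_mem_keys p b).mp hb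
  constructor
  · have hc : p.contains b = false := by
      rw [PySem.Dict.contains_eq_isSome_get?, hb]; rfl
    rw [PySem.Dict.keys_insert_of_not_contains p a hc]
    exact List.Nodup.append hw.1 (List.nodup_singleton b)
      (by simpa [List.disjoint_singleton] using hbk)
  · intro k v hkv
    rw [PySem.Dict.get?_insert] at hkv
    by_cases hk : k = b
    · subst hk; simp at hkv; omega
    · simp [hk] at hkv; exact hw.2 k v hkv

theorem pvFind_insert (p : PySem.Dict Int Int) (hw : pvWF p) (a b : Int)
    (hb : p.get? b = none) (ha : p.get? a = none) (hab : a < b) (x : Int) :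
    pvFind (p.insert b a) x = if pvFind p x = b then a else pvFind p x := by
  have hw' := pvWF_insert p hw a b hb hab
  suffices H : ∀ n x, pvKB p x ≤ n →
      pvFind (p.insert b a) x = if pvFind p x = b then a else pvFind p x from
    H (pvKB p x) x le_rfl
  intro n
  induction n with
  | zero =>
    intro x hx
    have hg := pv_get?_none_of_pvKB_zero p x (Nat.le_zero.mp hx)
    by_cases hxb : x = b
    · subst hxb
      have h1 : (p.insert x a).get? x = some a := PySem.Dict.get?_insert_self p x a
      rw [pvFind_step _ hw' x a h1]
      have h2 : (p.insert x a).get? a = none := by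
        rw [PySem.Dict.get?_insert]
        have : ¬ a = x := by omega
        simp [this, ha]
      rw [pvFind_stop _ a h2, pvFind_stop p x hg]
      simp
    · have h1 : (p.insert b a).get? x = none := by
        rw [PySem.Dict.get?_insert]; simp [hxb, hg]
      rw [pvFind_stop _ x h1, pvFind_stop p x hg]
      simp [hxb]
  | succ n ih =>
    intro x hx
    cases hg : p.get? x with
    | none =>
      exact (by
        by_cases hxb : x = b
        · subst hxb
          have h1 : (p.insert x a).get? x = some a := PySem.Dict.get?_insert_self p x a
          rw [pvFind_step _ hw' x a h1]
          have h2 : (p.insert x a).get? a = none := by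
            rw [PySem.Dict.get?_insert]
            have : ¬ a = x := by omega
            simp [this, ha]
          rw [pvFind_stop _ a h2, pvFind_stop p x hg]
          simp
        · have h1 : (p.insert b a).get? x = none := by
            rw [PySem.Dict.get?_insert]; simp [hxb, hg]
          rw [pvFind_stop _ x h1, pvFind_stop p x hg]
          simp [hxb])
    | some y =>
      have hxb : ¬ x = b := by
        intro he; subst he; rw [hb] at hg; cases hg
      have h1 : (p.insert b a).get? x = some y := by
        rw [PySem.Dict.get?_insert]; simp [hxb, hg]
      rw [pvFind_step _ hw' x y h1, pvFind_step p hw x y hg]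
      exact ih y (by have := pvKB_lt p x y hw hg; omega)

-- ---- the B-side run over the normalized rows ----

/-- Python's sorted([x, y]). -/
def pvSP (a b : Int) : List Int := [min a b, max a b]

def pvSt (R : List (List Int)) : PySem.Dict Int Int × List (Int × List Int) :=
  R.foldl pvBStep (PySem.Dict.empty, [])

/-- the two roots a row sees at its turn (min, max). -/
def pvTurn (R : List (List Int)) (j : Nat) : Int × Int :=
  let p := (pvSt (R.take j)).1
  let r := R.getD j []
  (min (pvFind p (r.getD 0 0)) (pvFind p (r.getD 1 0)),
   max (pvFind p (r.getD 0 0)) (pvFind p (r.getD 1 0)))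

/-- the state of A's row list after the outer loop has processed indices < i. -/
def pvDesc (R : List (List Int)) (i j : Nat) : List Int :=
  let p := (pvSt (R.take i)).1
  let r := R.getD j []
  if j < i then
    (if (pvTurn R j).1 ≠ (pvTurn R j).2 then
      pvFind p (pvTurn R j).2 :: (pvTurn R j).2 :: r.drop 2
    else
      pvFind p (r.getD 0 0) :: pvFind p (r.getD 0 0) :: r.drop 2)
  else
    pvSP (pvFind p (r.getD 0 0)) (pvFind p (r.getD 1 0)) ++ r.drop 2

/-- shape hypothesis on the normalized rows. -/
def pvRows (R : List (List Int)) : Prop :=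
  ∀ r ∈ R, 2 ≤ r.length ∧ r.Pairwise (· ≤ ·)


theorem pvBStep_eq (p : PySem.Dict Int Int) (pend : List (Int × List Int)) (r : List Int) :
    pvBStep (p, pend) r =
      if pvFind p (r.getD 0 0) ≠ pvFind p (r.getD 1 0) then
        (p.insert (max (pvFind p (r.getD 0 0)) (pvFind p (r.getD 1 0)))
                  (min (pvFind p (r.getD 0 0)) (pvFind p (r.getD 1 0))),
         pend ++ [(max (pvFind p (r.getD 0 0)) (pvFind p (r.getD 1 0)), r.drop 2)])
      else (p, pend) := by
  unfold pvBStep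
  simp only [PySem.List.pyGetD_zero, PySem.List.pyGetD_ofNat']
  rw [PySem.List.slice_from r (by norm_num : (0:Int) ≤ 2),
    (by decide : ((2:Int)).toNat = 2)]
  split_ifs with h1 h2
  · rw [max_eq_right (le_of_lt h2), min_eq_left (le_of_lt h2)]
  · have h3 : r.getD 1 0 = r.getD 1 0 := rfl
    have hgt : pvFind p (r.getD 1 0) < pvFind p (r.getD 0 0) := by
      rcases lt_or_gt_of_ne h1 with h' | h'
      · exact absurd h' h2
      · exact h'
    rw [max_eq_left (le_of_lt hgt), min_eq_right (le_of_lt hgt)]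
  · rfl

theorem pvBStep_WF (st : PySem.Dict Int Int × List (Int × List Int)) (r : List Int)
    (hw : pvWF st.1) : pvWF (pvBStep st r).1 := by
  unfold pvBStep
  by_cases h : pvFind st.1 (PySem.List.pyGetD r 0 0) = pvFind st.1 (PySem.List.pyGetD r 1 0)
  · simp [h, hw]
  · have h0 := pvFind_root st.1 hw (PySem.List.pyGetD r 0 0)
    have h1 := pvFind_root st.1 hw (PySem.List.pyGetD r 1 0)
    by_cases hlt : pvFind st.1 (PySem.List.pyGetD r 0 0) < pvFind st.1 (PySem.List.pyGetD r 1 0)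
    · simp only [h, hlt, if_true, if_false, ne_eq, not_false_iff]
      exact pvWF_insert _ hw _ _ h1 hlt
    · have hgt : pvFind st.1 (PySem.List.pyGetD r 1 0) < pvFind st.1 (PySem.List.pyGetD r 0 0) := by
        rcases lt_or_gt_of_ne h with h' | h' ; · exact absurd h' hlt
        exact h'
      simp only [h, hlt, ne_eq, not_false_iff, if_true, if_false]
      exact pvWF_insert _ hw _ _ h0 hgt

theorem pvSt_WF_aux (l : List (List Int)) :
    ∀ st, pvWF st.1 → pvWF (l.foldl pvBStep st).1 := by
  induction l with
  | nil => intro st h; exact h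
  | cons r t ih => intro st h; exact ih _ (pvBStep_WF st r h)

theorem pvWF_empty : pvWF (PySem.Dict.empty : PySem.Dict Int Int) := by
  constructor
  · simp [PySem.Dict.keys_empty]
  · intro k v h
    rw [PySem.Dict.get?_empty] at h
    cases h

theorem pvSt_WF' (R : List (List Int)) : pvWF (pvSt R).1 :=
  pvSt_WF_aux R _ pvWF_empty

theorem pvBStep_mono (st : PySem.Dict Int Int × List (Int × List Int)) (r : List Int)
    (hw : pvWF st.1) (k v : Int) (h : st.1.get? k = some v) :
    (pvBStep st r).1.get? k = some v := by
  unfold pvBStep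
  by_cases he : pvFind st.1 (PySem.List.pyGetD r 0 0) = pvFind st.1 (PySem.List.pyGetD r 1 0)
  · simp [he, h]
  · have h0 := pvFind_root st.1 hw (PySem.List.pyGetD r 0 0)
    have h1 := pvFind_root st.1 hw (PySem.List.pyGetD r 1 0)
    simp only [he, ne_eq, not_false_iff, if_true]
    rw [PySem.Dict.get?_insert]
    have hkne : ¬ k = (if pvFind st.1 (PySem.List.pyGetD r 0 0) < pvFind st.1 (PySem.List.pyGetD r 1 0)
        then pvFind st.1 (PySem.List.pyGetD r 1 0) else pvFind st.1 (PySem.List.pyGetD r 0 0)) := by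
      split_ifs with hl
      · intro he2; rw [he2, h1] at h; cases h
      · intro he2; rw [he2, h0] at h; cases h
    rw [if_neg hkne]
    exact h

theorem pvSt_mono_aux (l : List (List Int)) :
    ∀ st, pvWF st.1 → ∀ k v, st.1.get? k = some v →
      (l.foldl pvBStep st).1.get? k = some v := by
  induction l with
  | nil => intro st _ k v h; exact h
  | cons r t ih =>
    intro st hw k v h
    exact ih _ (pvBStep_WF st r hw) k v (pvBStep_mono st r hw k v h)

theorem pvSt_succ' (R : List (List Int)) (i : Nat) (h : i < R.length) :
    pvSt (R.take (i + 1)) = pvBStep (pvSt (R.take i)) (R.getD i []) := by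
  unfold pvSt
  rw [List.take_add_one, List.foldl_append]
  congr 1
  simp [List.getElem?_eq_getElem h, List.getD, List.getD_eq_getElem?_getD]

theorem pvSt_split (R : List (List Int)) (j i : Nat) (hj : j ≤ i) :
    pvSt (R.take i) = ((R.take i).drop j).foldl pvBStep (pvSt (R.take j)) := by
  conv_lhs => rw [show R.take i = (R.take i).take j ++ (R.take i).drop j from (List.take_append_drop _ _).symm]
  unfold pvSt
  rw [List.foldl_append, List.take_take, min_eq_left hj]

theorem pvMinMaxNe (a b : Int) (h : min a b ≠ max a b) : a ≠ b := by
  intro he; subst he; simp at h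

theorem pvSt_key' (R : List (List Int)) (j i : Nat) (hj : j < i) (hi : i ≤ R.length)
    (hs : (pvTurn R j).1 ≠ (pvTurn R j).2) :
    (pvSt (R.take i)).1.get? (pvTurn R j).2 = some (pvTurn R j).1 := by
  have hji : j < R.length := lt_of_lt_of_le hj hi
  have hsucc := pvSt_succ' R j hji
  have hne : pvFind (pvSt (R.take j)).1 ((R.getD j []).getD 0 0)
      ≠ pvFind (pvSt (R.take j)).1 ((R.getD j []).getD 1 0) := by
    apply pvMinMaxNe
    exact hs
  have hstep : pvSt (R.take (j+1))
      = ((pvSt (R.take j)).1.insert (pvTurn R j).2 (pvTurn R j).1,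
         (pvSt (R.take j)).2 ++ [((pvTurn R j).2, (R.getD j []).drop 2)]) := by
    rw [hsucc]
    have := pvBStep_eq (pvSt (R.take j)).1 (pvSt (R.take j)).2 (R.getD j [])
    rw [show pvSt (R.take j) = ((pvSt (R.take j)).1, (pvSt (R.take j)).2) from rfl, this,
      if_pos hne]
    rfl
  have hget : (pvSt (R.take (j+1))).1.get? (pvTurn R j).2 = some (pvTurn R j).1 := by
    rw [hstep]
    exact PySem.Dict.get?_insert_self _ _ _
  have hsplit := pvSt_split R (j+1) i hj
  rw [hsplit]
  exact pvSt_mono_aux _ _ (pvSt_WF' _) _ _ hget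

-- ---- A-side row step ----

def pvSub (a b x : Int) : Int := if x = b then a else x

def pvRStep (a b : Int) (r : List Int) : List Int :=
  match r with
  | x :: y :: t => pvSP (pvSub a b x) (pvSub a b y) ++ t
  | r => r

theorem pvSP_of_le (x y : Int) (h : x ≤ y) : pvSP x y = [x, y] := by
  simp [pvSP, min_eq_left h, max_eq_right h]

theorem pvSP_append_pairwise (x y : Int) (t : List Int) (ht : t.Pairwise (· ≤ ·))
    (hb : ∀ z ∈ t, max x y ≤ z) : (pvSP x y ++ t).Pairwise (· ≤ ·) := by
  apply List.pairwise_append.mpr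
  refine ⟨?_, ht, ?_⟩
  · rcases le_total x y with h | h
    · rw [pvSP_of_le x y h]; exact List.pairwise_pair.mpr h
    · rw [pvSP, min_eq_right h, max_eq_left h]; exact List.pairwise_pair.mpr h
  · intro z hz w hw
    have hbw := hb w hw
    have hz2 : z = min x y ∨ z = max x y := by
      simp [pvSP] at hz
      rcases hz with h | h
      · exact Or.inl h
      · exact Or.inr h
    have hmm : min x y ≤ max x y := min_le_max
    rcases hz2 with h | h <;> subst h <;> omega

theorem pvSP_append_perm (x y : Int) (t : List Int) :
    (pvSP x y ++ t).Perm (x :: y :: t) := by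
  rcases le_total x y with h | h
  · rw [pvSP_of_le x y h]
    exact List.Perm.refl _
  · rw [pvSP, min_eq_right h, max_eq_left h]
    exact List.Perm.swap x y t

theorem pvSortRow_pair (x y : Int) (t : List Int) (ht : t.Pairwise (· ≤ ·))
    (hb : ∀ z ∈ t, max x y ≤ z) : pvSortRow (x :: y :: t) = pvSP x y ++ t := by
  apply PySem.List.sorted_id_eq_of_perm_of_pairwise
  · exact pvSP_append_perm x y t
  · exact pvSP_append_pairwise x y t ht hb

theorem pvRow_ext (r : List Int) (h : 2 ≤ r.length) :
    r = r.getD 0 0 :: r.getD 1 0 :: r.drop 2 := by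
  match r, h with
  | x :: y :: t, _ => rfl

theorem pvRow_head_le (r : List Int) (h : 2 ≤ r.length) (hp : r.Pairwise (· ≤ ·)) :
    r.getD 0 0 ≤ r.getD 1 0 := by
  match r, h with
  | x :: y :: t, _ =>
    simp only [List.pairwise_cons] at hp
    exact hp.1 y (by simp)

theorem pvRow_tail_le (r : List Int) (h : 2 ≤ r.length) (hp : r.Pairwise (· ≤ ·)) :
    ∀ z ∈ r.drop 2, r.getD 1 0 ≤ z := by
  match r, h with
  | x :: y :: t, _ =>
    intro z hz
    simp only [List.pairwise_cons] at hp
    exact hp.2.1 z (by simpa using hz)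

theorem pvRow_tail_pairwise (r : List Int) (hp : r.Pairwise (· ≤ ·)) :
    (r.drop 2).Pairwise (· ≤ ·) := List.Pairwise.drop hp

theorem pvSub_le (a b z : Int) (hab : a ≤ b) : pvSub a b z ≤ z := by
  unfold pvSub; split_ifs with hz
  · omega
  · exact le_refl z

theorem pvRStep_facts (a b : Int) (r : List Int) (hab : a ≤ b) (h : 2 ≤ r.length)
    (hp : r.Pairwise (· ≤ ·)) :
    (pvRStep a b r).length = r.length ∧ (pvRStep a b r).Pairwise (· ≤ ·) ∧
      (pvRStep a b r).drop 2 = r.drop 2 := by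
  match r, h with
  | x :: y :: t, _ =>
    have hx := pvSub_le a b x hab
    have hy := pvSub_le a b y hab
    have ht := pvRow_tail_pairwise _ hp
    have htl := pvRow_tail_le _ (by simp) hp
    have hxy := pvRow_head_le _ (by simp) hp
    have hb2 : ∀ z ∈ t, max (pvSub a b x) (pvSub a b y) ≤ z := by
      intro z hz
      have := htl z (by simpa using hz)
      simp only [List.getD] at this ⊢
      have : y ≤ z := by simpa using this
      have hmx : max (pvSub a b x) (pvSub a b y) ≤ max x y := max_le_max hx hy
      have : max x y ≤ z := by
        have : x ≤ y := by simpa using hxy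
        omega
      omega
    refine ⟨by simp [pvRStep, pvSP], ?_, by simp [pvRStep, pvSP]⟩
    show (pvSP (pvSub a b x) (pvSub a b y) ++ t).Pairwise (· ≤ ·)
    exact pvSP_append_pairwise _ _ t (by simpa using ht) hb2

theorem pvRow_shape (r : List Int) (h : 2 ≤ r.length) : ∃ x y t, r = x :: y :: t := by
  match r, h with
  | x :: y :: t, _ => exact ⟨x, y, t, rfl⟩

theorem pvGetD_set_ne (l : List (List Int)) (j m : Nat) (v : List Int) (hjm : j ≠ m) :
    (l.set m v).getD j [] = l.getD j [] := by
  simp [List.getD, List.getElem?_set_ne (by omega : m ≠ j)]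

theorem pvGetD_set_self (l : List (List Int)) (m : Nat) (v : List Int) (h : m < l.length) :
    (l.set m v).getD m [] = v := by
  simp [List.getD, List.getElem?_set_self, h]

theorem pvSetD0 (r : List Int) (v : Int) : PySem.List.pySetD r 0 v = r.set 0 v := by
  simp [pysem]

theorem pvSetD1 (r : List Int) (v : Int) : PySem.List.pySetD r 1 v = r.set 1 v := by
  simp [pysem]

theorem pvGD0 (x y : Int) (t : List Int) : (x :: y :: t).getD 0 0 = x := rfl
theorem pvGD1 (x y : Int) (t : List Int) : (x :: y :: t).getD 1 0 = y := rfl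
theorem pvSet0 (x y v : Int) (t : List Int) : (x :: y :: t).set 0 v = v :: y :: t := rfl
theorem pvSet1 (x y v : Int) (t : List Int) : (x :: y :: t).set 1 v = x :: v :: t := rfl

theorem pvAInner_set (d : List (List Int)) (i k : Nat) (hik : i ≠ k)
    (hi : i < d.length) (hk : k < d.length)
    (hki : 2 ≤ (d.getD k []).length) (hkp : (d.getD k []).Pairwise (· ≤ ·))
    (hii : 2 ≤ (d.getD i []).length) (hip : (d.getD i []).Pairwise (· ≤ ·)) :
    pvAInner (i : Int) d (k : Int) =
      d.set k (pvRStep ((d.getD i []).getD 0 0) ((d.getD i []).getD 1 0) (d.getD k [])) := by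
  obtain ⟨x, y, t, hr⟩ := pvRow_shape _ hki
  have hab : (d.getD i []).getD 0 0 ≤ (d.getD i []).getD 1 0 := pvRow_head_le _ hii hip
  have hknei : (k : Int) ≠ (i : Int) := by
    intro he; exact hik (by exact_mod_cast he.symm)
  have hrange : PySem.List.pyRange 0 2 1 = [0, 1] := by decide
  have htp : t.Pairwise (· ≤ ·) := by
    have := pvRow_tail_pairwise _ hkp
    rw [hr] at this; simpa using this
  have htb : ∀ z ∈ t, y ≤ z := by
    have := pvRow_tail_le _ hki hkp
    rw [hr] at this; intro z hz; simpa using this z (by simpa using hz)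
  have hxy : x ≤ y := by
    have := pvRow_head_le _ hki hkp
    rw [hr] at this; simpa using this
  have hsort : ∀ x' y', x' ≤ x → y' ≤ y → pvSortRow (x' :: y' :: t) = pvSP x' y' ++ t := by
    intro x' y' hx' hy'
    apply pvSortRow_pair _ _ _ htp
    intro z hz
    have h1 := htb z hz
    have h2 : max x' y' ≤ max x y := max_le_max hx' hy'
    have h3 : max x y ≤ z := by omega
    omega
  unfold pvAInner
  rw [if_pos hknei, hrange]
  simp only [List.foldl_cons, List.foldl_nil, PySem.List.pyGetD_natCast, pvSetD0, pvSetD1,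
    PySem.List.pySetD_natCast, PySem.List.pyGetD_zero, PySem.List.pyGetD_ofNat']
  rw [hr]
  simp only [pvGD0, pvGD1, pvSet0, pvSet1]
  by_cases hxb : x = (d.getD i []).getD 1 0
  · rw [if_pos hxb]
    rw [pvGetD_set_self d k _ hk, pvGetD_set_ne d i k _ hik]
    simp only [pvGD0, pvGD1, pvSet0, pvSet1]
    by_cases hyb : y = (d.getD i []).getD 1 0
    · rw [if_pos hyb]
      have hgd : ((d.set k ((d.getD i []).getD 0 0 :: y :: t)).set k
            ((d.getD i []).getD 0 0 :: (d.getD i []).getD 0 0 :: t)).getD k []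
          = (d.getD i []).getD 0 0 :: (d.getD i []).getD 0 0 :: t := by
        rw [List.set_set]; exact pvGetD_set_self d k _ hk
      rw [hgd, hsort _ _ (by omega) (by omega), List.set_set, List.set_set]
      simp only [pvRStep, pvSub]
      rw [if_pos hxb, if_pos hyb]
    · rw [if_neg hyb]
      rw [pvGetD_set_self d k _ hk, hsort _ _ (by omega) (le_refl y), List.set_set]
      simp only [pvRStep, pvSub]
      rw [if_pos hxb, if_neg hyb]
  · rw [if_neg hxb]
    rw [hr]
    simp only [pvGD0, pvGD1, pvSet0, pvSet1]
    by_cases hyb : y = (d.getD i []).getD 1 0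
    · rw [if_pos hyb]
      rw [pvGetD_set_self d k _ hk, hsort _ _ (le_refl x) (by omega), List.set_set]
      simp only [pvRStep, pvSub]
      rw [if_neg hxb, if_pos hyb]
    · rw [if_neg hyb]
      rw [hr, hsort _ _ (le_refl x) (le_refl y)]
      simp only [pvRStep, pvSub]
      rw [if_neg hxb, if_neg hyb]

theorem pvInner_aux (i : Nat) (a b : Int) :
    ∀ (fuel m : Nat) (d : List (List Int)),
      d.length ≤ m + fuel → i < d.length →
      (∀ j, j < d.length → 2 ≤ (d.getD j []).length ∧ (d.getD j []).Pairwise (· ≤ ·)) →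
      (d.getD i []).getD 0 0 = a → (d.getD i []).getD 1 0 = b →
      ((PySem.List.pyRange (m : Int) (d.length : Int) 1).foldl (pvAInner (i : Int)) d).length
          = d.length ∧
      ∀ j, j < d.length →
        ((PySem.List.pyRange (m : Int) (d.length : Int) 1).foldl (pvAInner (i : Int)) d).getD j []
          = if j < m ∨ j = i then d.getD j [] else pvRStep a b (d.getD j []) := by
  intro fuel
  induction fuel with
  | zero =>
    intro m d hfm hi hrows ha hb
    have hmle : d.length ≤ m := by omega
    have hnil : PySem.List.pyRange (m : Int) (d.length : Int) 1 = [] :=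
      PySem.List.pyRange_one_eq_nil (by exact_mod_cast hmle)
    rw [hnil]
    refine ⟨rfl, fun j hj => ?_⟩
    rw [if_pos (Or.inl (by omega))]
    rfl
  | succ fuel ih =>
    intro m d hfm hi hrows ha hb
    by_cases hm : d.length ≤ m
    · have hnil : PySem.List.pyRange (m : Int) (d.length : Int) 1 = [] :=
        PySem.List.pyRange_one_eq_nil (by exact_mod_cast hm)
      rw [hnil]
      refine ⟨rfl, fun j hj => ?_⟩
      rw [if_pos (Or.inl (by omega))]
      rfl
    · have hmlt : m < d.length := by omega
      have hcons : PySem.List.pyRange (m : Int) (d.length : Int) 1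
          = (m : Int) :: PySem.List.pyRange ((m : Int) + 1) (d.length : Int) 1 :=
        PySem.List.pyRange_one_cons (by exact_mod_cast hmlt)
      have hcast : ((m : Int) + 1) = (((m + 1 : Nat)) : Int) := by push_cast; ring
      rw [hcons, List.foldl_cons, hcast]
      by_cases him : i = m
      · subst him
        have hid : pvAInner (i : Int) d (i : Int) = d := by simp [pvAInner]
        rw [hid]
        obtain ⟨hL, hD⟩ := ih (i + 1) d (by omega) hi hrows ha hb
        refine ⟨hL, fun j hj => ?_⟩
        rw [hD j hj]
        by_cases hji : j = i
        · subst hji; rw [if_pos (Or.inr rfl), if_pos (Or.inr rfl)]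
        · by_cases hjm : j < i
          · rw [if_pos (Or.inl (by omega)), if_pos (Or.inl hjm)]
          · rw [if_neg (by omega), if_neg (by omega)]
      · have hset : pvAInner (i : Int) d (m : Int)
            = d.set m (pvRStep ((d.getD i []).getD 0 0) ((d.getD i []).getD 1 0) (d.getD m [])) :=
          pvAInner_set d i m him hi hmlt (hrows m hmlt).1 (hrows m hmlt).2
            (hrows i hi).1 (hrows i hi).2
        rw [hset, ha, hb]
        set d' := d.set m (pvRStep a b (d.getD m [])) with hd'
        have hab : a ≤ b := by
          rw [← ha, ← hb]; exact pvRow_head_le _ (hrows i hi).1 (hrows i hi).2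
        have hfacts := pvRStep_facts a b (d.getD m []) hab (hrows m hmlt).1 (hrows m hmlt).2
        have hlen' : d'.length = d.length := by rw [hd']; exact List.length_set ..
        have hrows' : ∀ j, j < d'.length →
            2 ≤ (d'.getD j []).length ∧ (d'.getD j []).Pairwise (· ≤ ·) := by
          intro j hj
          rw [hlen'] at hj
          by_cases hjm : j = m
          · subst hjm
            rw [hd', pvGetD_set_self d j _ hj]
            exact ⟨by rw [hfacts.1]; exact (hrows j hj).1, hfacts.2.1⟩
          · rw [hd', pvGetD_set_ne d j m _ hjm]
            exact hrows j hj
        have hgi : d'.getD i [] = d.getD i [] := by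
          rw [hd', pvGetD_set_ne d i m _ him]
        obtain ⟨hL, hD⟩ := ih (m + 1) d' (by omega) (by omega) hrows'
          (by rw [hgi]; exact ha) (by rw [hgi]; exact hb)
        rw [hlen'] at hL hD
        refine ⟨hL, fun j hj => ?_⟩
        rw [hD j hj]
        by_cases hjm : j = m
        · subst hjm
          have hjm2 : j < d.length := hj
          rw [if_pos (Or.inl (by omega)), if_neg (by omega), hd', pvGetD_set_self d j _ hjm2]
        · have hgj : d'.getD j [] = d.getD j [] := by rw [hd', pvGetD_set_ne d j m _ hjm]
          by_cases hjlt : j < m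
          · rw [if_pos (Or.inl (by omega)), if_pos (Or.inl hjlt), hgj]
          · by_cases hji : j = i
            · rw [if_pos (Or.inr hji), if_pos (Or.inr hji), hgj]
            · rw [if_neg (by omega), if_neg (by omega), hgj]

theorem pvFind_empty (x : Int) : pvFind (PySem.Dict.empty : PySem.Dict Int Int) x = x := rfl

theorem pvSub_self (c z : Int) : pvSub c c z = z := by
  unfold pvSub; split_ifs with h
  · omega
  · rfl

theorem pvSP_comm (x y : Int) : pvSP x y = pvSP y x := by
  simp [pvSP, min_comm, max_comm]

theorem pvRows_mem (R : List (List Int)) (hR : pvRows R) (j : Nat) (hj : j < R.length) :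
    2 ≤ (R.getD j []).length ∧ (R.getD j []).Pairwise (· ≤ ·) := by
  have hm : R.getD j [] ∈ R := by
    rw [List.getD_eq_getElem?_getD, List.getElem?_eq_getElem hj]
    exact List.getElem_mem hj
  exact hR _ hm

theorem pvTurn_root (R : List (List Int)) (j : Nat) :
    (pvSt (R.take j)).1.get? (pvTurn R j).1 = none ∧
    (pvSt (R.take j)).1.get? (pvTurn R j).2 = none := by
  have hw := pvSt_WF' (R.take j)
  have h0 := pvFind_root _ hw ((R.getD j []).getD 0 0)
  have h1 := pvFind_root _ hw ((R.getD j []).getD 1 0)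
  unfold pvTurn
  constructor
  · rcases min_cases (pvFind (pvSt (R.take j)).1 ((R.getD j []).getD 0 0))
      (pvFind (pvSt (R.take j)).1 ((R.getD j []).getD 1 0)) with ⟨he, _⟩ | ⟨he, _⟩ <;>
      simp only [he] <;> assumption
  · rcases max_cases (pvFind (pvSt (R.take j)).1 ((R.getD j []).getD 0 0))
      (pvFind (pvSt (R.take j)).1 ((R.getD j []).getD 1 0)) with ⟨he, _⟩ | ⟨he, _⟩ <;>
      simp only [he] <;> assumption

theorem pvDesc_parts (R : List (List Int)) (hR : pvRows R) (i j : Nat) (hij : i ≤ R.length)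
    (hj : j < R.length) :
    ∃ c1 c2, pvDesc R i j = c1 :: c2 :: (R.getD j []).drop 2 ∧ c1 ≤ c2 ∧
      c2 ≤ (R.getD j []).getD 1 0 := by
  obtain ⟨hl, hp⟩ := pvRows_mem R hR j hj
  have huv := pvRow_head_le _ hl hp
  have hwi := pvSt_WF' (R.take i)
  have hwj := pvSt_WF' (R.take j)
  unfold pvDesc
  by_cases hji : j < i
  · rw [if_pos hji]
    by_cases hs : (pvTurn R j).1 ≠ (pvTurn R j).2
    · rw [if_pos hs]
      refine ⟨_, _, rfl, pvFind_le _ hwi _, ?_⟩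
      show (pvTurn R j).2 ≤ _
      unfold pvTurn
      have f0 := pvFind_le _ hwj ((R.getD j []).getD 0 0)
      have f1 := pvFind_le _ hwj ((R.getD j []).getD 1 0)
      simp only []
      omega
    · rw [if_neg hs]
      refine ⟨_, _, rfl, le_refl _, ?_⟩
      have := pvFind_le _ hwi ((R.getD j []).getD 0 0)
      omega
  · rw [if_neg hji]
    have f0 := pvFind_le _ hwi ((R.getD j []).getD 0 0)
    have f1 := pvFind_le _ hwi ((R.getD j []).getD 1 0)
    refine ⟨_, _, rfl, min_le_max, ?_⟩
    show max _ _ ≤ _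
    omega

theorem pvDesc_rowfacts (R : List (List Int)) (hR : pvRows R) (i j : Nat) (hij : i ≤ R.length)
    (hj : j < R.length) :
    2 ≤ (pvDesc R i j).length ∧ (pvDesc R i j).Pairwise (· ≤ ·) := by
  obtain ⟨c1, c2, he, h12, h2v⟩ := pvDesc_parts R hR i j hij hj
  obtain ⟨hl, hp⟩ := pvRows_mem R hR j hj
  have htl := pvRow_tail_le _ hl hp
  have htp := pvRow_tail_pairwise _ hp
  rw [he]
  refine ⟨by simp, ?_⟩
  rw [List.pairwise_cons]
  refine ⟨?_, ?_⟩
  · intro z hz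
    rcases List.mem_cons.mp hz with rfl | hz
    · exact h12
    · have := htl z (by simpa using hz)
      omega
  · rw [List.pairwise_cons]
    refine ⟨fun z hz => by have := htl z hz; omega, htp⟩

theorem pvDesc_self_getD (R : List (List Int)) (i : Nat) :
    (pvDesc R i i).getD 0 0 = (pvTurn R i).1 ∧ (pvDesc R i i).getD 1 0 = (pvTurn R i).2 := by
  unfold pvDesc
  rw [if_neg (lt_irrefl i)]
  exact ⟨rfl, rfl⟩

theorem pvStep_desc (R : List (List Int)) (hR : pvRows R) (i : Nat) (hi : i < R.length)
    (j : Nat) (hj : j < R.length) :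
    (if j = i then pvDesc R i i
     else pvRStep (pvTurn R i).1 (pvTurn R i).2 (pvDesc R i j)) = pvDesc R (i + 1) j := by
  have hwP := pvSt_WF' (R.take i)
  have hroots := pvTurn_root R i
  obtain ⟨hli, hpi⟩ := pvRows_mem R hR i hi
  by_cases hs : (pvTurn R i).1 ≠ (pvTurn R i).2
  · -- surviving step: the parent map gains (turn.2 ↦ turn.1)
    have hab : (pvTurn R i).1 < (pvTurn R i).2 := by
      have : (pvTurn R i).1 ≤ (pvTurn R i).2 := min_le_max
      omega
    have hstep : pvSt (R.take (i+1))
        = ((pvSt (R.take i)).1.insert (pvTurn R i).2 (pvTurn R i).1,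
           (pvSt (R.take i)).2 ++ [((pvTurn R i).2, (R.getD i []).drop 2)]) := by
      rw [pvSt_succ' R i hi]
      have := pvBStep_eq (pvSt (R.take i)).1 (pvSt (R.take i)).2 (R.getD i [])
      have hne : pvFind (pvSt (R.take i)).1 ((R.getD i []).getD 0 0)
          ≠ pvFind (pvSt (R.take i)).1 ((R.getD i []).getD 1 0) := pvMinMaxNe _ _ hs
      rw [show pvSt (R.take i) = ((pvSt (R.take i)).1, (pvSt (R.take i)).2) from rfl, this,
        if_pos hne]
      rfl
    have hP' : (pvSt (R.take (i+1))).1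
        = (pvSt (R.take i)).1.insert (pvTurn R i).2 (pvTurn R i).1 := by rw [hstep]
    have hw' : pvWF ((pvSt (R.take i)).1.insert (pvTurn R i).2 (pvTurn R i).1) :=
      pvWF_insert _ hwP _ _ hroots.2 hab
    have hfi := pvFind_insert (pvSt (R.take i)).1 hwP (pvTurn R i).1 (pvTurn R i).2
      hroots.2 hroots.1 hab
    have hsub_find : ∀ x, pvSub (pvTurn R i).1 (pvTurn R i).2 (pvFind (pvSt (R.take i)).1 x)
        = pvFind ((pvSt (R.take i)).1.insert (pvTurn R i).2 (pvTurn R i).1) x := by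
      intro x
      rw [hfi x]
      rfl
    have hfb : pvFind ((pvSt (R.take i)).1.insert (pvTurn R i).2 (pvTurn R i).1) (pvTurn R i).2
        = (pvTurn R i).1 := by
      rw [hfi, pvFind_stop _ _ hroots.2, if_pos rfl]
    by_cases hji : j = i
    · subst hji
      rw [if_pos rfl]
      unfold pvDesc
      rw [if_neg (lt_irrefl j), if_pos (Nat.lt_succ_self j), if_pos hs, hP', hfb]
      rfl
    · rw [if_neg hji]
      by_cases hjlt : j < i
      · by_cases hsj : (pvTurn R j).1 ≠ (pvTurn R j).2
        · have hkey := pvSt_key' R j i hjlt (le_of_lt hi) hsj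
          have hBb : (pvTurn R j).2 ≠ (pvTurn R i).2 := by
            intro he
            rw [he, hroots.2] at hkey
            cases hkey
          have hfB : pvFind ((pvSt (R.take i)).1.insert (pvTurn R i).2 (pvTurn R i).1)
              (pvTurn R j).2
              = pvSub (pvTurn R i).1 (pvTurn R i).2 (pvFind (pvSt (R.take i)).1 (pvTurn R j).2) :=
            (hsub_find _).symm
          unfold pvDesc
          rw [if_pos hjlt, if_pos (by omega : j < i + 1), if_pos hsj, if_pos hsj, hP']
          show pvRStep (pvTurn R i).1 (pvTurn R i).2
              (pvFind (pvSt (R.take i)).1 (pvTurn R j).2 :: (pvTurn R j).2 :: _) = _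
          rw [pvRStep, hfB.symm]
          have hsB : pvSub (pvTurn R i).1 (pvTurn R i).2 (pvTurn R j).2 = (pvTurn R j).2 := by
            unfold pvSub
            rw [if_neg hBb]
          rw [hsB, pvSP_of_le _ _ (pvFind_le _ hw' _)]
          rfl
        · unfold pvDesc
          rw [if_pos hjlt, if_pos (by omega : j < i + 1), if_neg hsj, if_neg hsj, hP']
          show pvRStep (pvTurn R i).1 (pvTurn R i).2
              (pvFind (pvSt (R.take i)).1 ((R.getD j []).getD 0 0)
                :: pvFind (pvSt (R.take i)).1 ((R.getD j []).getD 0 0) :: _) = _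
          rw [pvRStep, hsub_find, pvSP_of_le _ _ (le_refl _)]
          rfl
      · have hgt : i < j := by omega
        unfold pvDesc
        rw [if_neg hjlt, if_neg (by omega : ¬ j < i + 1), hP']
        have hcons : pvSP (pvFind (pvSt (R.take i)).1 ((R.getD j []).getD 0 0))
              (pvFind (pvSt (R.take i)).1 ((R.getD j []).getD 1 0)) ++ (R.getD j []).drop 2
            = min (pvFind (pvSt (R.take i)).1 ((R.getD j []).getD 0 0))
                (pvFind (pvSt (R.take i)).1 ((R.getD j []).getD 1 0))
              :: max (pvFind (pvSt (R.take i)).1 ((R.getD j []).getD 0 0))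
                (pvFind (pvSt (R.take i)).1 ((R.getD j []).getD 1 0))
              :: (R.getD j []).drop 2 := rfl
        rw [hcons, pvRStep]
        have hswap : pvSP (pvSub (pvTurn R i).1 (pvTurn R i).2
              (min (pvFind (pvSt (R.take i)).1 ((R.getD j []).getD 0 0))
                (pvFind (pvSt (R.take i)).1 ((R.getD j []).getD 1 0))))
            (pvSub (pvTurn R i).1 (pvTurn R i).2
              (max (pvFind (pvSt (R.take i)).1 ((R.getD j []).getD 0 0))
                (pvFind (pvSt (R.take i)).1 ((R.getD j []).getD 1 0))))
            = pvSP (pvSub (pvTurn R i).1 (pvTurn R i).2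
                (pvFind (pvSt (R.take i)).1 ((R.getD j []).getD 0 0)))
              (pvSub (pvTurn R i).1 (pvTurn R i).2
                (pvFind (pvSt (R.take i)).1 ((R.getD j []).getD 1 0))) := by
          rcases le_total (pvFind (pvSt (R.take i)).1 ((R.getD j []).getD 0 0))
            (pvFind (pvSt (R.take i)).1 ((R.getD j []).getD 1 0)) with hle | hle
          · rw [min_eq_left hle, max_eq_right hle]
          · rw [min_eq_right hle, max_eq_left hle, pvSP_comm]
        rw [hswap, hsub_find, hsub_find]
  · have hfeq : pvFind (pvSt (R.take i)).1 ((R.getD i []).getD 0 0)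
        = pvFind (pvSt (R.take i)).1 ((R.getD i []).getD 1 0) := by
      by_contra hne
      have : min (pvFind (pvSt (R.take i)).1 ((R.getD i []).getD 0 0))
            (pvFind (pvSt (R.take i)).1 ((R.getD i []).getD 1 0))
          ≠ max (pvFind (pvSt (R.take i)).1 ((R.getD i []).getD 0 0))
            (pvFind (pvSt (R.take i)).1 ((R.getD i []).getD 1 0)) := by
        rcases lt_or_gt_of_ne hne with h | h
        · rw [min_eq_left (le_of_lt h), max_eq_right (le_of_lt h)]; omega
        · rw [min_eq_right (le_of_lt h), max_eq_left (le_of_lt h)]; omega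
      exact hs this
    have hPsame : pvSt (R.take (i+1)) = pvSt (R.take i) := by
      rw [pvSt_succ' R i hi]
      have := pvBStep_eq (pvSt (R.take i)).1 (pvSt (R.take i)).2 (R.getD i [])
      rw [show pvSt (R.take i) = ((pvSt (R.take i)).1, (pvSt (R.take i)).2) from rfl, this,
        if_neg (by simpa using hfeq)]
    have hc : (pvTurn R i).1 = (pvTurn R i).2 := not_ne_iff.mp hs
    by_cases hji : j = i
    · subst hji
      rw [if_pos rfl]
      unfold pvDesc
      rw [if_neg (lt_irrefl j), if_pos (Nat.lt_succ_self j), if_neg (not_not_intro hc), hPsame]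
      show pvSP (pvFind (pvSt (R.take j)).1 ((R.getD j []).getD 0 0))
          (pvFind (pvSt (R.take j)).1 ((R.getD j []).getD 1 0)) ++ _ = _
      rw [hfeq, pvSP_of_le _ _ (le_refl _)]
      rfl
    · rw [if_neg hji]
      have hLHS : pvRStep (pvTurn R i).1 (pvTurn R i).2 (pvDesc R i j) = pvDesc R i j := by
        obtain ⟨c1, c2, he, h12, h2v⟩ := pvDesc_parts R hR i j (le_of_lt hi) hj
        rw [he, pvRStep, hc, pvSub_self, pvSub_self, pvSP_of_le _ _ h12]
        rfl
      rw [hLHS]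
      unfold pvDesc
      by_cases hjlt : j < i
      · rw [if_pos hjlt, if_pos (by omega : j < i + 1), hPsame]
      · rw [if_neg hjlt, if_neg (by omega : ¬ j < i + 1), hPsame]

theorem pvDesc_zero (R : List (List Int)) (hR : pvRows R) (j : Nat) (hj : j < R.length) :
    pvDesc R 0 j = R.getD j [] := by
  obtain ⟨hl, hp⟩ := pvRows_mem R hR j hj
  have huv := pvRow_head_le _ hl hp
  unfold pvDesc
  rw [if_neg (by omega : ¬ j < 0)]
  show pvSP (pvFind (pvSt (R.take 0)).1 _) (pvFind (pvSt (R.take 0)).1 _) ++ _ = _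
  rw [show R.take 0 = [] from rfl, show pvSt [] = (PySem.Dict.empty, []) from rfl]
  rw [pvFind_empty, pvFind_empty, pvSP_of_le _ _ huv]
  exact (pvRow_ext _ hl).symm

theorem pvOuter' (R : List (List Int)) (hR : pvRows R) :
    ∀ i, i ≤ R.length →
    ((PySem.List.pyRange 0 (i : Int) 1).foldl
        (fun d i => (PySem.List.pyRange 0 (PySem.List.len d) 1).foldl (pvAInner i) d) R).length
      = R.length ∧
    ∀ j, j < R.length →
      ((PySem.List.pyRange 0 (i : Int) 1).foldl
        (fun d i => (PySem.List.pyRange 0 (PySem.List.len d) 1).foldl (pvAInner i) d) R).getD j []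
        = pvDesc R i j := by
  intro i
  induction i with
  | zero =>
    intro _
    rw [show ((0 : Nat) : Int) = 0 from rfl, PySem.List.pyRange_one_eq_nil (le_refl 0)]
    exact ⟨rfl, fun j hj => (pvDesc_zero R hR j hj).symm⟩
  | succ i ih =>
    intro hi1
    have hi : i < R.length := by omega
    obtain ⟨ihL, ihD⟩ := ih (by omega)
    have hsplit : PySem.List.pyRange 0 ((i + 1 : Nat) : Int) 1
        = PySem.List.pyRange 0 (i : Nat) 1 ++ [(i : Int)] := by
      have : ((i + 1 : Nat) : Int) = (i : Int) + 1 := by push_cast; ring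
      rw [this]
      exact PySem.List.pyRange_one_succ_right (by exact_mod_cast Nat.zero_le i)
    rw [hsplit, List.foldl_append, List.foldl_cons, List.foldl_nil]
    set D := (PySem.List.pyRange 0 (i : Int) 1).foldl
        (fun d i => (PySem.List.pyRange 0 (PySem.List.len d) 1).foldl (pvAInner i) d) R with hD
    have hrowsD : ∀ j, j < D.length → 2 ≤ (D.getD j []).length ∧ (D.getD j []).Pairwise (· ≤ ·) := by
      intro j hj
      rw [ihL] at hj
      rw [ihD j hj]
      exact pvDesc_rowfacts R hR i j (le_of_lt hi) hj
    have hgetDi : D.getD i [] = pvDesc R i i := ihD i hi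
    have ha : (D.getD i []).getD 0 0 = (pvTurn R i).1 := by
      rw [hgetDi]; exact (pvDesc_self_getD R i).1
    have hb : (D.getD i []).getD 1 0 = (pvTurn R i).2 := by
      rw [hgetDi]; exact (pvDesc_self_getD R i).2
    have hinner := pvInner_aux i (pvTurn R i).1 (pvTurn R i).2 D.length 0 D
      (by omega) (by omega) hrowsD ha hb
    rw [PySem.List.len_eq]
    simp only [Nat.cast_zero] at hinner
    obtain ⟨hL2, hD2⟩ := hinner
    refine ⟨by rw [hL2, ihL], fun j hj => ?_⟩
    have hjD : j < D.length := by omega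
    rw [hD2 j hjD]
    by_cases hji : j = i
    · subst hji
      rw [if_pos (Or.inr rfl), hgetDi]
      have := pvStep_desc R hR j hi j hj
      rw [if_pos rfl] at this
      exact this
    · rw [if_neg (by omega), ihD j hj]
      have := pvStep_desc R hR i hi j hj
      rw [if_neg hji] at this
      exact this

theorem pvFinal (R : List (List Int)) (hR : pvRows R) (D : List (List Int))
    (hDdesc : ∀ j, j < R.length → D.getD j [] = pvDesc R R.length j) :
    ∀ i, i ≤ R.length →
    ((PySem.List.pyRange 0 (i : Int) 1).foldl (fun acc k =>
        if PySem.List.pyGetD (PySem.List.pyGetD D k []) 0 0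
             ≠ PySem.List.pyGetD (PySem.List.pyGetD D k []) 1 0 then
          acc ++ [PySem.List.pyGetD D k []]
        else acc) [])
      = (pvSt (R.take i)).2.map (fun p => pvFind (pvSt (R.take R.length)).1 p.1 :: p.1 :: p.2) := by
  intro i
  induction i with
  | zero =>
    intro _
    rw [show ((0 : Nat) : Int) = 0 from rfl, PySem.List.pyRange_one_eq_nil (le_refl 0)]
    rfl
  | succ i ih =>
    intro hi1
    have hi : i < R.length := by omega
    have hsplit : PySem.List.pyRange 0 ((i + 1 : Nat) : Int) 1
        = PySem.List.pyRange 0 (i : Nat) 1 ++ [(i : Int)] := by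
      have : ((i + 1 : Nat) : Int) = (i : Int) + 1 := by push_cast; ring
      rw [this]
      exact PySem.List.pyRange_one_succ_right (by exact_mod_cast Nat.zero_le i)
    rw [hsplit, List.foldl_append, List.foldl_cons, List.foldl_nil, ih (by omega)]
    simp only [PySem.List.pyGetD_natCast, PySem.List.pyGetD_zero, PySem.List.pyGetD_ofNat']
    rw [hDdesc i hi]
    have hwn := pvSt_WF' (R.take R.length)
    unfold pvDesc
    rw [if_pos hi]
    by_cases hs : (pvTurn R i).1 ≠ (pvTurn R i).2
    · rw [if_pos hs]
      have hkey := pvSt_key' R i R.length hi le_rfl hs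
      have hlt := pvFind_lt_key _ hwn _ _ hkey
      have hcond : pvFind (pvSt (R.take R.length)).1 (pvTurn R i).2 ≠ (pvTurn R i).2 := by omega
      rw [if_pos (by simpa using hcond)]
      have hstep : pvSt (R.take (i+1))
          = ((pvSt (R.take i)).1.insert (pvTurn R i).2 (pvTurn R i).1,
             (pvSt (R.take i)).2 ++ [((pvTurn R i).2, (R.getD i []).drop 2)]) := by
        rw [pvSt_succ' R i hi]
        have := pvBStep_eq (pvSt (R.take i)).1 (pvSt (R.take i)).2 (R.getD i [])
        have hne : pvFind (pvSt (R.take i)).1 ((R.getD i []).getD 0 0)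
            ≠ pvFind (pvSt (R.take i)).1 ((R.getD i []).getD 1 0) := pvMinMaxNe _ _ hs
        rw [show pvSt (R.take i) = ((pvSt (R.take i)).1, (pvSt (R.take i)).2) from rfl, this,
          if_pos hne]
        rfl
      rw [hstep]
      simp
    · rw [if_neg hs]
      have hc : (pvTurn R i).1 = (pvTurn R i).2 := not_ne_iff.mp hs
      rw [if_neg (by simp)]
      have hfeq : pvFind (pvSt (R.take i)).1 ((R.getD i []).getD 0 0)
          = pvFind (pvSt (R.take i)).1 ((R.getD i []).getD 1 0) := by
        by_contra hne
        have h2 : min (pvFind (pvSt (R.take i)).1 ((R.getD i []).getD 0 0))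
              (pvFind (pvSt (R.take i)).1 ((R.getD i []).getD 1 0))
            ≠ max (pvFind (pvSt (R.take i)).1 ((R.getD i []).getD 0 0))
              (pvFind (pvSt (R.take i)).1 ((R.getD i []).getD 1 0)) := by
          rcases lt_or_gt_of_ne hne with h | h
          · rw [min_eq_left (le_of_lt h), max_eq_right (le_of_lt h)]; omega
          · rw [min_eq_right (le_of_lt h), max_eq_left (le_of_lt h)]; omega
        exact hs h2
      have hPsame : pvSt (R.take (i+1)) = pvSt (R.take i) := by
        rw [pvSt_succ' R i hi]
        have := pvBStep_eq (pvSt (R.take i)).1 (pvSt (R.take i)).2 (R.getD i [])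
        rw [show pvSt (R.take i) = ((pvSt (R.take i)).1, (pvSt (R.take i)).2) from rfl, this,
          if_neg (by simpa using hfeq)]
      rw [hPsame]

theorem pvMain' (delta_old : List (List Int))
    (hpre : ∀ r ∈ delta_old, 2 ≤ r.length) :
    execute_delta_in_delta delta_old = execute_delta_in_delta_alt delta_old := by
  have hR : pvRows (PySem.List.sorted (delta_old.map pvSortRow) (fun x => x) false) := by
    intro r hr
    rw [PySem.List.mem_sorted] at hr
    obtain ⟨r0, hr0, he⟩ := List.mem_map.mp hr
    constructor
    · rw [← he]
      unfold pvSortRow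
      rw [PySem.List.length_sorted]
      exact hpre r0 hr0
    · rw [← he]
      have := PySem.List.sorted_pairwise r0 (fun x => x)
      simpa using this
  simp only [execute_delta_in_delta, execute_delta_in_delta_alt]
  have h1 : (PySem.List.pyRange 0 (PySem.List.len delta_old) 1).foldl
      (fun acc i => acc ++ [pvSortRow (PySem.List.pyGetD delta_old i [])]) []
      = delta_old.map pvSortRow := by
    rw [PySem.List.foldl_pyRange_zero_pyGetD delta_old [] (fun acc x => acc ++ [pvSortRow x]) []]
    rw [PySem.List.foldl_append_singleton_eq_map]
    simp
  rw [h1]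
  set R := PySem.List.sorted (delta_old.map pvSortRow) (fun x => x) false with hRdef
  obtain ⟨hLf, hDf⟩ := pvOuter' R hR R.length le_rfl
  set Df := (PySem.List.pyRange 0 ((R.length : Nat) : Int) 1).foldl
      (fun d i => (PySem.List.pyRange 0 (PySem.List.len d) 1).foldl (pvAInner i) d) R with hDfdef
  have hlenR : PySem.List.len R = ((R.length : Nat) : Int) := PySem.List.len_eq R
  rw [hlenR]
  have hlenDf : PySem.List.len Df = ((R.length : Nat) : Int) := by
    rw [PySem.List.len_eq, hLf]
  rw [hlenDf]
  have hfin := pvFinal R hR Df (fun j hj => hDf j hj) R.length le_rfl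
  rw [hfin, List.take_length]
  rfl

-- ===== VERDICT (by name: the statement is the Claim_ definition above) =====
theorem execute_delta_in_delta_spec : Claim_equal_execute_delta_in_delta := by
  intro delta_old _ hpre
  unfold Spec_execute_delta_in_delta
  exact pvMain' delta_old hpre
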